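-- pv_equiv track=rewrite | github.com/doktima/sales_data_pipeline | Bugatti/MassUpload.py | classify_model_code
-- ===== SOURCE A (Python) =====
-- AV_SUFFIXES = {
--     "PNT", "DGBRLLK", "CEUSCL2", ".ABEUBK", "AGBRLLK",
--     ".ABEUWH", ".ABSWBK", ".ABSWWH", "AGBRLLX", "BGBRLLK",
--     "EGBRLLK", "BGBRJJK", "ABEUWHF", "CGBRLLK", "AGBRLLZ",
--     "CGBRLBI", "CGBRLBK", "CEUSLLK", "AEUSLLA", "AEUSLLB"
-- }
--
-- TV_SUFFIXES = {
--     "GLT", ".AEK", "AEKQ", "AEKW", "AEKM", "AEKD"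
-- }
--
-- def classify_model_code(model_code):
--     if not isinstance(model_code, str):
--         return "UNKNOWN"
--     if any(model_code.endswith(sfx) for sfx in AV_SUFFIXES):
--         return "AV"
--     if any(model_code.endswith(sfx) for sfx in TV_SUFFIXES):
--         return "TV"
--     return "UNKNOWN"
-- ===== SOURCE B (Python) =====
-- AV_BY_LEN = {
--     3: {"PNT"},
--     7: {"DGBRLLK", "CEUSCL2", ".ABEUBK", "AGBRLLK",
--         ".ABEUWH", ".ABSWBK", ".ABSWWH", "AGBRLLX", "BGBRLLK",
--         "EGBRLLK", "BGBRJJK", "ABEUWHF", "CGBRLLK", "AGBRLLZ",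
--         "CGBRLBI", "CGBRLBK", "CEUSLLK", "AEUSLLA", "AEUSLLB"},
-- }
--
-- TV_BY_LEN = {
--     3: {"GLT"},
--     4: {".AEK", "AEKQ", "AEKW", "AEKM", "AEKD"},
-- }
--
-- def classify_model_code(model_code):
--     if not isinstance(model_code, str):
--         return "UNKNOWN"
--     for length, sfxs in AV_BY_LEN.items():
--         if model_code[-length:] in sfxs:
--             return "AV"
--     for length, sfxs in TV_BY_LEN.items():
--         if model_code[-length:] in sfxs:
--             return "TV"
--     return "UNKNOWN"
-- ===== Notes on version B (the rewrite author's own statement) =====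
-- stated objective: idiomatic
-- what changed: B replaces the per-suffix endswith scan with a table keyed by suffix length: one slice of the tail per distinct length followed by a set-membership test, preserving the AV-before-TV priority.
import Mathlib
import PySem

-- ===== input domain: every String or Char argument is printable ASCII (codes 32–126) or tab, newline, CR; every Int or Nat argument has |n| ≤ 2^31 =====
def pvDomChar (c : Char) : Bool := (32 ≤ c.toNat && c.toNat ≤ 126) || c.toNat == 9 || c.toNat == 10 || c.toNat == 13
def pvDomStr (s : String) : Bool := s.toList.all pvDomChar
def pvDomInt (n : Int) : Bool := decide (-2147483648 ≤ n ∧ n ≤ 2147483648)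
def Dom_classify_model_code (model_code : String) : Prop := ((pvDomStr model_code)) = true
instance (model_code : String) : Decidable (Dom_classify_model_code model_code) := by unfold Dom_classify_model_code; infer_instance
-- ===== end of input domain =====

-- B groups the suffixes by length and tests one tail slice per distinct length against a set,
-- instead of A's endswith scan over every suffix (objective: idiomatic table-driven lookup).


-- ===== PORT A =====
def av_suffixes : List String :=
  ["PNT", "DGBRLLK", "CEUSCL2", ".ABEUBK", "AGBRLLK",
   ".ABEUWH", ".ABSWBK", ".ABSWWH", "AGBRLLX", "BGBRLLK",
   "EGBRLLK", "BGBRJJK", "ABEUWHF", "CGBRLLK", "AGBRLLZ",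
   "CGBRLBI", "CGBRLBK", "CEUSLLK", "AEUSLLA", "AEUSLLB"]

def tv_suffixes : List String := ["GLT", ".AEK", "AEKQ", "AEKW", "AEKM", "AEKD"]

def classify_model_code (model_code : String) : String :=
  if av_suffixes.any (fun sfx => PySem.Str.endswith model_code sfx) then "AV"
  else if tv_suffixes.any (fun sfx => PySem.Str.endswith model_code sfx) then "TV"
  else "UNKNOWN"

-- ===== PORT B =====
def avLen3 : List (List Char) := ["PNT".toList]
def avLen7 : List (List Char) :=
  ["DGBRLLK".toList, "CEUSCL2".toList, ".ABEUBK".toList, "AGBRLLK".toList,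
   ".ABEUWH".toList, ".ABSWBK".toList, ".ABSWWH".toList, "AGBRLLX".toList, "BGBRLLK".toList,
   "EGBRLLK".toList, "BGBRJJK".toList, "ABEUWHF".toList, "CGBRLLK".toList, "AGBRLLZ".toList,
   "CGBRLBI".toList, "CGBRLBK".toList, "CEUSLLK".toList, "AEUSLLA".toList, "AEUSLLB".toList]

def avByLen : List (Nat × List (List Char)) := [(3, avLen3), (7, avLen7)]

def tvLen3 : List (List Char) := ["GLT".toList]
def tvLen4 : List (List Char) := [".AEK".toList, "AEKQ".toList, "AEKW".toList, "AEKM".toList, "AEKD".toList]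

def tvByLen : List (Nat × List (List Char)) := [(3, tvLen3), (4, tvLen4)]

def classify_model_code_alt (model_code : String) : String :=
  let cs := model_code.toList
  if avByLen.any (fun g => g.2.contains (PySem.List.slice cs (some (-(g.1 : Int))) none)) then "AV"
  else if tvByLen.any (fun g => g.2.contains (PySem.List.slice cs (some (-(g.1 : Int))) none)) then "TV"
  else "UNKNOWN"

-- ===== PRECONDITION & SPEC =====
def Spec_classify_model_code (model_code : String) (out : String) : Prop := out = classify_model_code_alt model_code
instance (model_code : String) (out : String) : Decidable (Spec_classify_model_code model_code out) := by unfold Spec_classify_model_code; infer_instance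

-- ===== CLAIM (what is proved, stated in full; the proofs are below) =====
def Claim_equal_classify_model_code : Prop := ∀ (model_code : String), Dom_classify_model_code model_code → Spec_classify_model_code model_code (classify_model_code model_code)

-- ===== LEMMAS AND PROOFS =====

-- testing the tail slice of length k against a k-long suffix is exactly endswith
lemma slice_beq_eq_endswith (cs p : List Char) (k : Nat) (h1 : p.length = k) (h2 : 0 < k) :
    (PySem.List.slice cs (some (-(k : Int))) none == p) = PySem.Chars.endswith cs p := by
  subst h1
  rw [PySem.List.slice_from_neg_natCast cs p.length h2, Bool.eq_iff_iff, beq_iff_eq,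
      PySem.Chars.endswith_iff, List.suffix_iff_eq_drop]
  exact eq_comm

-- membership of the tail slice in a set of same-length suffixes = any endswith over that set
lemma group_any (cs : List Char) (k : Nat) (hk : 0 < k) (ss : List (List Char))
    (h : ∀ p ∈ ss, p.length = k) :
    ss.contains (PySem.List.slice cs (some (-(k : Int))) none)
      = ss.any (fun p => PySem.Chars.endswith cs p) := by
  induction ss with
  | nil => rfl
  | cons q qs ih =>
    simp only [List.contains_cons, List.any_cons]
    rw [slice_beq_eq_endswith cs q k (h q (by simp)) hk,
        ih (fun p hp => h p (by simp [hp]))]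

-- ===== VERDICT (by name: the statement is the Claim_ definition above) =====
theorem classify_model_code_spec : Claim_equal_classify_model_code := by
  intro mc _
  unfold Spec_classify_model_code classify_model_code classify_model_code_alt
  simp only [avByLen, tvByLen, List.any_cons, List.any_nil, Bool.or_false]
  rw [group_any mc.toList 3 (by decide) avLen3 (by decide),
      group_any mc.toList 7 (by decide) avLen7 (by decide),
      group_any mc.toList 3 (by decide) tvLen3 (by decide),
      group_any mc.toList 4 (by decide) tvLen4 (by decide)]
  simp [avLen3, avLen7, tvLen3, tvLen4, av_suffixes, tv_suffixes]
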